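-- pv_equiv track=rewrite | github.com/skine134/My_algorithm | study_algorithm/boom_board.py | solution
-- ===== SOURCE A (Python) =====
-- def boom_aria(board, i, j):
--     boom_set = set()
--     for y in range(i-1 , i+2):
--         for x in range(j-1,j+2):
--             if 0<= x < len(board[0]) and 0<= y < len(board) and not (x == j and y == i):
--                 boom_set.add((y,x))
--     return boom_set
--
-- def solution(board):
--     boom_set = set()
--     for i in range(len(board)):
--         for j in range(len(board[0])):
--             if board[i][j] == 1:
--                 boom_set.update(boom_aria(board,i,j))
--     for i,j in boom_set:
--         board[i][j] = 1
--     sum = 0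
--     for row in board:
--         sum = sum + row.count(0)
--     return sum
-- ===== SOURCE B (Python) =====
-- def solution(board):
--     # Pull-based single pass: for each cell, look at its clamped 3x3 window in a
--     # snapshot of the original board; mutates board exactly as A does.
--     h = len(board)
--     w = len(board[0]) if board else 0
--     snap = [list(row) for row in board]
--
--     def hot(i, j):
--         for y in range(max(0, i - 1), min(h, i + 2)):
--             for x in range(max(0, j - 1), min(w, j + 2)):
--                 if snap[y][x] == 1:
--                     return True
--         return False
--
--     zeros = 0
--     for i, row in enumerate(board):
--         for j, v in enumerate(row):
--             if j < w and hot(i, j):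
--                 if v != 1:
--                     board[i][j] = 1
--             elif v == 0:
--                 zeros += 1
--     return zeros
-- ===== Notes on version B (the rewrite author's own statement) =====
-- stated objective: simpler
-- what changed: B replaces A's push-style algorithm (collect a set of neighbor coordinates of every 1, then a separate marking pass and a separate counting pass) by a single pull-style pass that, for each cell, inspects its clamped 3x3 window in a snapshot of the original board, mutating and counting in one sweep with no coordinate set.
import Mathlib
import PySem

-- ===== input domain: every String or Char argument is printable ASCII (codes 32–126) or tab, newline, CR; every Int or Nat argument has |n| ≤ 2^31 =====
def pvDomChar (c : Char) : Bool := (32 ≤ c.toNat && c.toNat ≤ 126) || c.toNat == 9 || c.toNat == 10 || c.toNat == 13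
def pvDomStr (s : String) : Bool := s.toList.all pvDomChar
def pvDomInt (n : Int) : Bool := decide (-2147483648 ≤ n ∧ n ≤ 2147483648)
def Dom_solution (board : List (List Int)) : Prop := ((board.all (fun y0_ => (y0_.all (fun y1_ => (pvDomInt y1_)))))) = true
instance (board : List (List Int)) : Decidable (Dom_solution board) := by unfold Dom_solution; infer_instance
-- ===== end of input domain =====

-- B replaces A's push-style coordinate-set algorithm by a pull-style single pass
-- over cells (objective: simpler); equivalence is about the RETURN value — the
-- Python B performs the same in-place mutation of `board` as A does.

-- ===== PORT A =====
def boomAria (board : List (List Int)) (i j : Int) : PySem.Set (Int × Int) :=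
  (PySem.List.pyRange (i - 1) (i + 2) 1).foldl (fun s y =>
    (PySem.List.pyRange (j - 1) (j + 2) 1).foldl (fun s x =>
      if 0 ≤ x ∧ x < ((PySem.List.pyGetD board 0 []).length : Int) ∧
         0 ≤ y ∧ y < (board.length : Int) ∧ ¬(x = j ∧ y = i)
      then PySem.Set.add s (y, x) else s) s) PySem.Set.empty

-- the first double loop of A's `solution` (builds boom_set)
def boomSetOf (board : List (List Int)) : PySem.Set (Int × Int) :=
  (PySem.List.pyRange 0 (board.length : Int) 1).foldl (fun s i =>
    (PySem.List.pyRange 0 ((PySem.List.pyGetD board 0 []).length : Int) 1).foldl (fun s j =>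
      if PySem.List.pyGetD (PySem.List.pyGetD board i []) j 0 = 1
      then PySem.Set.update s (boomAria board i j) else s) s) PySem.Set.empty

-- one iteration of A's marking loop: board[i][j] = 1
def markStep (b : List (List Int)) (p : Int × Int) : List (List Int) :=
  PySem.List.pySetD b p.1 (PySem.List.pySetD (PySem.List.pyGetD b p.1 []) p.2 1)

def solution (board : List (List Int)) : Int :=
  let boomSet := boomSetOf board
  let board2 := boomSet.foldl markStep board
  board2.foldl (fun s row => s + (PySem.List.count row 0 : Int)) 0

-- ===== PORT B =====
def hotCell (snap : List (List Int)) (h w i j : Int) : Bool :=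
  (PySem.List.pyRange (max 0 (i - 1)) (min h (i + 2)) 1).any (fun y =>
    (PySem.List.pyRange (max 0 (j - 1)) (min w (j + 2)) 1).any (fun x =>
      PySem.List.pyGetD (PySem.List.pyGetD snap y []) x 0 == 1))

def solution_alt (board : List (List Int)) : Int :=
  let h : Int := board.length
  let w : Int := match board with | [] => 0 | r :: _ => (r.length : Int)
  (PySem.List.enumerate board 0).foldl (fun z p =>
    (PySem.List.enumerate p.2 0).foldl (fun z q =>
      if q.1 < w ∧ hotCell board h w p.1 q.1 = true then z
      else if q.2 = 0 then z + 1 else z) z) 0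

-- ===== PRECONDITION & SPEC =====
-- Pre_ excludes exactly the ragged boards having some row shorter than the first
-- row, on which A raises IndexError (it reads board[i][j] for all j < len(board[0])).
def Pre_solution (board : List (List Int)) : Prop :=
  ∀ row ∈ board, (board.headD []).length ≤ row.length
instance (board : List (List Int)) : Decidable (Pre_solution board) := by
  unfold Pre_solution; infer_instance
def pvWitness_solution : List (List Int) := [[1, 0, 2], [0, 0, 0]]
def Spec_solution (board : List (List Int)) (out : Int) : Prop := out = solution_alt board
instance (board : List (List Int)) (out : Int) : Decidable (Spec_solution board out) := by
  unfold Spec_solution; infer_instance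

-- ===== CLAIM (what is proved, stated in full; the proofs are below) =====
def Claim_equal_solution : Prop := ∀ (board : List (List Int)), Dom_solution board → Pre_solution board → Spec_solution board (solution board)

-- ===== LEMMAS AND PROOFS =====

-- the original value of cell (i, j), as both ports read it
def cell (b : List (List Int)) (i j : Int) : Int :=
  PySem.List.pyGetD (PySem.List.pyGetD b i []) j 0

def Wd (board : List (List Int)) : Int := ((PySem.List.pyGetD board 0 []).length : Int)
def Ht (board : List (List Int)) : Int := (board.length : Int)

-- what A's boom_set means: (a, b) is an in-bounds neighbor of some cell that holds 1
def Mark (board : List (List Int)) (a b : Int) : Prop :=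
  ∃ i, (0 ≤ i ∧ i < Ht board) ∧ ∃ j, (0 ≤ j ∧ j < Wd board) ∧
    cell board i j = 1 ∧
    (0 ≤ b ∧ b < Wd board ∧ 0 ≤ a ∧ a < Ht board ∧ ¬(b = j ∧ a = i) ∧
     i - 1 ≤ a ∧ a < i + 2 ∧ j - 1 ≤ b ∧ b < j + 2)

theorem Wd_eq (board : List (List Int)) :
    (match board with | [] => (0 : Int) | r :: _ => (r.length : Int)) = Wd board := by
  cases board <;> simp [Wd, PySem.List.pyGetD]

theorem Wd_eq_headD (board : List (List Int)) :
    Wd board = ((board.headD []).length : Int) := by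
  cases board <;> simp [Wd, PySem.List.pyGetD]

-- generic: membership after a fold that only ever adds elements
theorem mem_foldl_acc {β : Type} (L : List β) (F : PySem.Set (Int × Int) → β → PySem.Set (Int × Int))
    (Q : β → Prop) (p : Int × Int)
    (hF : ∀ s y, p ∈ F s y ↔ p ∈ s ∨ Q y) :
    ∀ s0, p ∈ L.foldl F s0 ↔ p ∈ s0 ∨ ∃ y ∈ L, Q y := by
  induction L with
  | nil => intro s0; simp
  | cons y L ih =>
      intro s0
      simp only [List.foldl_cons, ih, hF, List.mem_cons]
      constructor
      · rintro (((h | h) | ⟨z, hz, hQ⟩))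
        · exact Or.inl h
        · exact Or.inr ⟨y, Or.inl rfl, h⟩
        · exact Or.inr ⟨z, Or.inr hz, hQ⟩
      · rintro (h | ⟨z, (rfl | hz), hQ⟩)
        · exact Or.inl (Or.inl h)
        · exact Or.inl (Or.inr hQ)
        · exact Or.inr ⟨z, hz, hQ⟩

theorem mem_boomAria (board : List (List Int)) (i j a b : Int) :
    (a, b) ∈ boomAria board i j ↔
      (0 ≤ b ∧ b < Wd board ∧ 0 ≤ a ∧ a < Ht board ∧ ¬(b = j ∧ a = i) ∧
       i - 1 ≤ a ∧ a < i + 2 ∧ j - 1 ≤ b ∧ b < j + 2) := by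
  unfold boomAria
  rw [mem_foldl_acc _ _
      (fun y => ∃ x ∈ PySem.List.pyRange (j - 1) (j + 2) 1,
        (0 ≤ x ∧ x < Wd board ∧ 0 ≤ y ∧ y < Ht board ∧ ¬(x = j ∧ y = i)) ∧ (a, b) = (y, x))
      (a, b)
      (by
        intro s y
        rw [mem_foldl_acc _ _
            (fun x => (0 ≤ x ∧ x < Wd board ∧ 0 ≤ y ∧ y < Ht board ∧ ¬(x = j ∧ y = i)) ∧ (a, b) = (y, x))
            (a, b)
            (by
              intro s' x
              split_ifs with hC
              · rw [PySem.Set.mem_add]; simp only [Wd, Ht]; tauto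
              · simp only [Wd, Ht]; tauto)])]
  simp only [PySem.Set.empty, List.not_mem_nil, false_or, PySem.List.mem_pyRange_one,
    Prod.mk.injEq]
  constructor
  · rintro ⟨y, hy, x, hx, hC, rfl, rfl⟩
    refine ⟨hC.1, hC.2.1, hC.2.2.1, hC.2.2.2.1, hC.2.2.2.2, by omega, by omega, by omega, by omega⟩
  · rintro ⟨h1, h2, h3, h4, h5, h6, h7, h8, h9⟩
    exact ⟨a, ⟨h6, h7⟩, b, ⟨h8, h9⟩, ⟨h1, h2, h3, h4, h5⟩, rfl, rfl⟩

theorem mem_boomSetOf (board : List (List Int)) (a b : Int) :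
    (a, b) ∈ boomSetOf board ↔ Mark board a b := by
  unfold boomSetOf
  rw [mem_foldl_acc _ _
      (fun i => ∃ j ∈ PySem.List.pyRange 0 (Wd board) 1,
        cell board i j = 1 ∧ (a, b) ∈ boomAria board i j)
      (a, b)
      (by
        intro s i
        rw [mem_foldl_acc _ _
            (fun j => cell board i j = 1 ∧ (a, b) ∈ boomAria board i j)
            (a, b)
            (by
              intro s' j
              split_ifs with hC
              · rw [PySem.Set.mem_update]; unfold cell at hC ⊢; tauto
              · unfold cell at hC ⊢; tauto)]
        simp only [Wd])]
  simp only [PySem.Set.empty, List.not_mem_nil, false_or, PySem.List.mem_pyRange_one,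
    mem_boomAria, Mark, Ht, Wd]

theorem cell_natCast (b : List (List Int)) (r c : Nat) :
    cell b (r : Int) (c : Int) = (b.getD r []).getD c 0 := by
  simp [cell, PySem.List.pyGetD_natCast]

theorem hotCell_iff (snap : List (List Int)) (h w i j : Int) :
    hotCell snap h w i j = true ↔
      ∃ y, (max 0 (i - 1) ≤ y ∧ y < min h (i + 2)) ∧
        ∃ x, (max 0 (j - 1) ≤ x ∧ x < min w (j + 2)) ∧ cell snap y x = 1 := by
  simp only [hotCell, List.any_eq_true, PySem.List.mem_pyRange_one, beq_iff_eq, cell]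

theorem crux1 (board : List (List Int)) (r c : Nat)
    (hmem : ((r : Int), (c : Int)) ∈ boomSetOf board) :
    (c : Int) < Wd board ∧ hotCell board (Ht board) (Wd board) (r : Int) (c : Int) = true := by
  rw [mem_boomSetOf] at hmem
  obtain ⟨i, hi, j, hj, hc1, hb⟩ := hmem
  refine ⟨hb.2.1, ?_⟩
  rw [hotCell_iff]
  exact ⟨i, ⟨by omega, by omega⟩, j, ⟨by omega, by omega⟩, hc1⟩

theorem crux2 (board : List (List Int)) (r c : Nat)
    (hr : r < board.length)
    (hv : cell board (r : Int) (c : Int) = 0)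
    (hcw : (c : Int) < Wd board)
    (hhot : hotCell board (Ht board) (Wd board) (r : Int) (c : Int) = true) :
    ((r : Int), (c : Int)) ∈ boomSetOf board := by
  rw [hotCell_iff] at hhot
  obtain ⟨y, hy, x, hx, hc1⟩ := hhot
  rw [mem_boomSetOf]
  have hne : ¬((c : Int) = x ∧ (r : Int) = y) := by
    rintro ⟨rfl, rfl⟩
    rw [hv] at hc1; exact absurd hc1 (by norm_num)
  have hrH : (r : Int) < Ht board := by simp [Ht]; omega
  exact ⟨y, ⟨by omega, by omega⟩, x, ⟨by omega, by omega⟩, hc1,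
    by positivity, hcw, by positivity, hrH, hne, by omega, by omega, by omega, by omega⟩

-- single marking step board[p.1][p.2] = 1
theorem length_markStep (b : List (List Int)) (p : Int × Int) :
    (markStep b p).length = b.length := by
  simp [markStep, PySem.List.length_pySetD]

theorem rowlen_markStep (b : List (List Int)) (p : Int × Int)
    (h1 : 0 ≤ p.1) (h2 : 0 ≤ p.2) (k : Nat) :
    ((markStep b p).getD k []).length = ((b.getD k []).length) := by
  rw [markStep, PySem.List.pySetD_of_nonneg _ _ h1, PySem.List.pySetD_of_nonneg _ _ h2,
    PySem.List.pyGetD_of_nonneg _ _ h1]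
  simp only [List.getD_eq_getElem?_getD, List.getElem?_set]
  by_cases hk : p.1.toNat = k
  · subst hk
    by_cases hlt : p.1.toNat < b.length
    · simp [hlt, List.length_set]
    · simp [hlt]
  · simp [hk]

theorem cell_markStep (b : List (List Int)) (p : Int × Int)
    (h1 : 0 ≤ p.1) (h1' : p.1 < (b.length : Int))
    (h2 : 0 ≤ p.2) (h2' : p.2 < ((b.getD p.1.toNat []).length : Int))
    (r c : Nat) :
    cell (markStep b p) (r : Int) (c : Int) =
      if ((r : Int), (c : Int)) = p then 1 else cell b (r : Int) (c : Int) := by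
  rw [markStep, PySem.List.pySetD_of_nonneg _ _ h1, PySem.List.pySetD_of_nonneg _ _ h2,
    PySem.List.pyGetD_of_nonneg _ _ h1, cell_natCast, cell_natCast]
  have hP : (((r : Int), (c : Int)) = p) ↔ (p.1.toNat = r ∧ p.2.toNat = c) := by
    rw [Prod.ext_iff]; omega
  have hblen : p.1.toNat < b.length := by omega
  have hrowlen : p.2.toNat < (b.getD p.1.toNat []).length := by omega
  by_cases hr : p.1.toNat = r
  · have houter : (b.set p.1.toNat ((b.getD p.1.toNat []).set p.2.toNat 1)).getD r []
        = (b.getD p.1.toNat []).set p.2.toNat 1 := by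
      rw [List.getD_eq_getElem?_getD, List.getElem?_set, if_pos hr, if_pos hblen,
        Option.getD_some]
    rw [houter]
    by_cases hc : p.2.toNat = c
    · rw [if_pos (hP.mpr ⟨hr, hc⟩), List.getD_eq_getElem?_getD, List.getElem?_set,
        if_pos hc, if_pos hrowlen, Option.getD_some]
    · rw [if_neg (fun h => hc (hP.mp h).2), List.getD_eq_getElem?_getD, List.getElem?_set,
        if_neg hc, ← List.getD_eq_getElem?_getD, hr]
  · have houter : (b.set p.1.toNat ((b.getD p.1.toNat []).set p.2.toNat 1)).getD r []
        = b.getD r [] := by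
      rw [List.getD_eq_getElem?_getD, List.getElem?_set, if_neg hr,
        ← List.getD_eq_getElem?_getD]
    rw [houter, if_neg (fun h => hr (hP.mp h).1)]

theorem markFold_spec (S : List (Int × Int)) :
    ∀ (b : List (List Int)),
      (∀ p ∈ S, 0 ≤ p.1 ∧ p.1 < (b.length : Int) ∧ 0 ≤ p.2 ∧
        p.2 < ((b.getD p.1.toNat []).length : Int)) →
      (S.foldl markStep b).length = b.length ∧
      (∀ k : Nat, ((S.foldl markStep b).getD k []).length = (b.getD k []).length) ∧
      (∀ r c : Nat, cell (S.foldl markStep b) (r : Int) (c : Int) =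
        if ((r : Int), (c : Int)) ∈ S then 1 else cell b (r : Int) (c : Int)) := by
  induction S with
  | nil => intro b _; refine ⟨rfl, fun k => rfl, fun r c => by simp⟩
  | cons p S ih =>
      intro b hb
      have hp := hb p (List.mem_cons_self ..)
      have hb' : ∀ q ∈ S, 0 ≤ q.1 ∧ q.1 < ((markStep b p).length : Int) ∧ 0 ≤ q.2 ∧
          q.2 < (((markStep b p).getD q.1.toNat []).length : Int) := by
        intro q hq
        have h := hb q (List.mem_cons_of_mem _ hq)
        rw [length_markStep, rowlen_markStep b p hp.1 hp.2.2.1]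
        exact h
      obtain ⟨l1, l2, l3⟩ := ih (markStep b p) hb'
      refine ⟨?_, ?_, ?_⟩
      · rw [List.foldl_cons, l1, length_markStep]
      · intro k
        rw [List.foldl_cons, l2, rowlen_markStep b p hp.1 hp.2.2.1]
      · intro r c
        rw [List.foldl_cons, l3, cell_markStep b p hp.1 hp.2.1 hp.2.2.1 hp.2.2.2]
        by_cases hS : ((r : Int), (c : Int)) ∈ S
        · simp [hS]
        · by_cases hP : ((r : Int), (c : Int)) = p
          · simp [hP]
          · simp [hP]

theorem cell_board_eq (board : List (List Int)) (r c : Nat)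
    (hr : r < board.length) (hc : c < (board[r]'hr).length) :
    cell board (r : Int) (c : Int) = (board[r]'hr)[c]'hc := by
  rw [cell_natCast, List.getD_eq_getElem board [] hr, List.getD_eq_getElem _ 0 hc]

theorem main_eq (board : List (List Int)) (pre : Pre_solution board) :
    solution board = solution_alt board := by
  have hbound : ∀ p ∈ boomSetOf board, 0 ≤ p.1 ∧ p.1 < (board.length : Int) ∧ 0 ≤ p.2 ∧
      p.2 < ((board.getD p.1.toNat []).length : Int) := by
    rintro ⟨a, b⟩ hp
    rw [mem_boomSetOf] at hp
    obtain ⟨i, hi, j, hj, hc, hb⟩ := hp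
    simp only [Ht, Wd] at hb
    have halen : a.toNat < board.length := by omega
    have hmemrow : board.getD a.toNat [] ∈ board := by
      rw [List.getD_eq_getElem board [] halen]
      exact List.getElem_mem halen
    have hW := pre _ hmemrow
    have hWc : ((board.headD []).length : Int) ≤ ((board.getD a.toNat []).length : Int) := by
      exact_mod_cast hW
    have hWd' : ((PySem.List.pyGetD board 0 []).length : Int) = ((board.headD []).length : Int) :=
      Wd_eq_headD board
    dsimp only
    refine ⟨by omega, by omega, by omega, by omega⟩
  obtain ⟨hlen, hrowlen, hcell⟩ := markFold_spec (boomSetOf board) board hbound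
  set B2 := (boomSetOf board).foldl markStep board with hB2def
  -- A's result as a sum over the marked rows
  have hA : solution board =
      0 + (B2.map (fun row => ((List.count 0 row : Nat) : Int))).sum := by
    show B2.foldl (fun s row => s + (PySem.List.count row 0 : Int)) 0 = _
    simp only [PySem.List.count_eq]
    exact PySem.List.foldl_add B2 _ 0
  -- B's result as a sum over the original enumerated rows
  have hinner : ∀ (z : Int) (i : Int) (row : List Int),
      (PySem.List.enumerate row 0).foldl (fun z q =>
        if q.1 < Wd board ∧ hotCell board (Ht board) (Wd board) i q.1 = true then z
        else if q.2 = 0 then z + 1 else z) z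
      = z + ((List.countP (fun q =>
          decide (¬(q.1 < Wd board ∧ hotCell board (Ht board) (Wd board) i q.1 = true) ∧
            q.2 = 0)) (PySem.List.enumerate row 0) : Nat) : Int) := by
    intro z i row
    have hfun : (fun (z : Int) (q : Int × Int) =>
        if q.1 < Wd board ∧ hotCell board (Ht board) (Wd board) i q.1 = true then z
        else if q.2 = 0 then z + 1 else z)
      = (fun (z : Int) (q : Int × Int) =>
        if (¬(q.1 < Wd board ∧ hotCell board (Ht board) (Wd board) i q.1 = true) ∧
            q.2 = 0) then z + 1 else z) := by
      funext z q
      split_ifs <;> tauto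
    rw [hfun, PySem.List.foldl_ite_add_one]
  have hB : solution_alt board =
      0 + ((PySem.List.enumerate board 0).map (fun p =>
        ((List.countP (fun q =>
          decide (¬(q.1 < Wd board ∧ hotCell board (Ht board) (Wd board) p.1 q.1 = true) ∧
            q.2 = 0)) (PySem.List.enumerate p.2 0) : Nat) : Int))).sum := by
    show (PySem.List.enumerate board 0).foldl (fun z p =>
      (PySem.List.enumerate p.2 0).foldl (fun z q =>
        if q.1 < (match board with | [] => (0 : Int) | r :: _ => (r.length : Int)) ∧
            hotCell board (board.length : Int)
              (match board with | [] => (0 : Int) | r :: _ => (r.length : Int)) p.1 q.1 = true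
        then z else if q.2 = 0 then z + 1 else z) z) 0 = _
    simp only [Wd_eq board, show (board.length : Int) = Ht board from rfl]
    simp only [hinner]
    exact PySem.List.foldl_add _ _ 0
  rw [hA, hB]
  suffices hls : (B2.map (fun row => ((List.count 0 row : Nat) : Int))) =
      ((PySem.List.enumerate board 0).map (fun p =>
        ((List.countP (fun q =>
          decide (¬(q.1 < Wd board ∧ hotCell board (Ht board) (Wd board) p.1 q.1 = true) ∧
            q.2 = 0)) (PySem.List.enumerate p.2 0) : Nat) : Int))) by rw [hls]
  apply List.ext_getElem
  · simp [hlen, PySem.List.length_enumerate]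
  · intro r h1 h2
    have hrB2 : r < B2.length := by simpa using h1
    have hr : r < board.length := by rw [← hlen]; exact hrB2
    have hrE : r < (PySem.List.enumerate board 0).length := by
      rw [PySem.List.length_enumerate]; exact hr
    rw [List.getElem_map, List.getElem_map, PySem.List.getElem_enumerate board 0 r hrE]
    -- identify the marked row
    have hrowlen' : (B2[r]'hrB2).length = (board[r]'hr).length := by
      have := hrowlen r
      rwa [List.getD_eq_getElem B2 [] hrB2, List.getD_eq_getElem board [] hr] at this
    have hrowB2 : B2[r]'hrB2 = (PySem.List.enumerate (board[r]'hr) 0).map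
        (fun q => if ((r : Int), q.1) ∈ boomSetOf board then (1 : Int) else q.2) := by
      apply List.ext_getElem
      · simp [hrowlen', PySem.List.length_enumerate]
      · intro c hc1 hc2
        have hc : c < (board[r]'hr).length := by rwa [hrowlen'] at hc1
        have hcE : c < (PySem.List.enumerate (board[r]'hr) 0).length := by
          rw [PySem.List.length_enumerate]; exact hc
        rw [List.getElem_map, PySem.List.getElem_enumerate _ 0 c hcE]
        have hL : (B2[r]'hrB2)[c]'hc1 = cell B2 (r : Int) (c : Int) := by
          rw [cell_natCast, List.getD_eq_getElem B2 [] hrB2, List.getD_eq_getElem _ 0 hc1]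
        rw [hL, hcell r c, cell_board_eq board r c hr hc]
        simp only [zero_add]
    rw [hrowB2, List.count_eq_countP, List.countP_map]
    simp only [zero_add]
    congr 1
    apply List.countP_congr
    intro q hq
    rw [PySem.List.mem_enumerate_iff] at hq
    obtain ⟨k, hk, rfl⟩ := hq
    simp only [zero_add, Function.comp_apply]
    have hvk : cell board (r : Int) (k : Int) = (board[r]'hr)[k]'hk :=
      cell_board_eq board r k hr hk
    by_cases hm : (((r : Int), (k : Int)) : Int × Int) ∈ boomSetOf board
    · obtain ⟨hcw, hhot⟩ := crux1 board r k hm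
      simp [hm, hcw, hhot]
    · by_cases hv : (board[r]'hr)[k]'hk = 0
      · have hnohot : ¬((k : Int) < Wd board ∧
            hotCell board (Ht board) (Wd board) (r : Int) (k : Int) = true) := by
          rintro ⟨hcw, hhot⟩
          exact hm (crux2 board r k hr (by rw [hvk]; exact hv) hcw hhot)
        simp [hm, hv, hnohot]
      · simp [hm, hv]

-- ===== VERDICT (by name: the statement is the Claim_ definition above) =====
theorem solution_spec : Claim_equal_solution := by
  intro board _ pre
  unfold Spec_solution
  exact main_eq board pre
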